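-- pv_equiv track=rewrite | github.com/jonathancreedon/DataAnalyticsProject | my_python_spark/A02_Part3.py | join_lists
-- ===== SOURCE A (Python) =====
-- def join_lists(list1,list2):
--     res = []
--     indext = 0
--     indexd = 0
--     for item in list1:
--       res.insert(0,(list2[indexd],item))
--       indexd += item[1]
--     res.reverse()
--     return res
-- ===== SOURCE B (Python) =====
-- def join_lists(list1, list2):
--     # divide and conquer: the index of an item is base + sum of weights before it
--     # within its segment; split in halves and recurse (depth O(log n))
--     def go(items, base):
--         if len(items) == 0:
--             return []
--         if len(items) == 1:
--             return [(list2[base], items[0])]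
--         mid = len(items) // 2
--         left = items[:mid]
--         return go(left, base) + go(items[mid:], base + sum(w for _, w in left))
--     return go(list1, 0)
-- ===== Notes on version B (the rewrite author's own statement) =====
-- stated objective: alternative
-- what changed: Replaces A's linear running-accumulator loop (insert(0)+reverse) by a divide-and-conquer recursion: split list1 in halves, recurse with the base offset shifted by the left half's weight sum, and concatenate.
import Mathlib
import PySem

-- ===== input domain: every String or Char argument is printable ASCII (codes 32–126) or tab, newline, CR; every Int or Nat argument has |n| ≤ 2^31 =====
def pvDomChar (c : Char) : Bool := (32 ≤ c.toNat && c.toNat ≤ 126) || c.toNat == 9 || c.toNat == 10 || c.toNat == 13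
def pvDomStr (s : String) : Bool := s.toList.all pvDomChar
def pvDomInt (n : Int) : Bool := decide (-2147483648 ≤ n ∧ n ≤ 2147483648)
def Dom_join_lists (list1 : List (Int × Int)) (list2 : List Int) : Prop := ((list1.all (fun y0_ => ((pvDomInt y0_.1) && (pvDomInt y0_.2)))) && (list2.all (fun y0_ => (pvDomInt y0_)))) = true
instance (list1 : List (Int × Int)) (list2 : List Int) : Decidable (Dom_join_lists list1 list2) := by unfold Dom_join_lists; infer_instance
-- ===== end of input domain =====

-- B replaces A's running-accumulator loop (insert(0) + reverse) by a divide-and-conquer recursion over halves of list1. Objective: alternative.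
-- ===== PORT A =====
-- state = (res, indexd); res.insert(0, x) is cons; list2[indexd] is pyGet? (in range under Pre_)
def join_lists (list1 : List (Int × Int)) (list2 : List Int) : List (Int × (Int × Int)) :=
  (list1.foldl
    (fun (st : List (Int × (Int × Int)) × Int) item =>
      (((PySem.List.pyGet? list2 st.2).getD 0, item) :: st.1, st.2 + item.2))
    ([], 0)).1.reverse

-- ===== PORT B =====
-- Source B's inner go(items, base); items[:mid]/items[mid:] with 0 ≤ mid ≤ len are List.take/List.drop
def join_lists_altGo (list2 : List Int) (items : List (Int × Int)) (base : Int) : List (Int × (Int × Int)) :=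
  match items with
  | [] => []
  | [it] => [((PySem.List.pyGet? list2 base).getD 0, it)]
  | a :: b :: t =>
    let mid := (a :: b :: t).length / 2
    let left := (a :: b :: t).take mid
    join_lists_altGo list2 left base ++
      join_lists_altGo list2 ((a :: b :: t).drop mid) (base + (left.map Prod.snd).sum)
termination_by items.length
decreasing_by
  · simp; omega
  · simp; omega

def join_lists_alt (list1 : List (Int × Int)) (list2 : List Int) : List (Int × (Int × Int)) :=
  join_lists_altGo list2 list1 0

-- ===== PRECONDITION & SPEC =====
-- Pre_ excludes exactly the inputs on which A raises IndexError: some cumulative index into list2 is out of Python's (negative-inclusive) range.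
def Pre_join_lists (list1 : List (Int × Int)) (list2 : List Int) : Prop :=
  ∀ i ∈ List.range list1.length,
    PySem.Raise.InRange list2.length (((list1.take i).map Prod.snd).sum)
instance (list1 : List (Int × Int)) (list2 : List Int) : Decidable (Pre_join_lists list1 list2) := by unfold Pre_join_lists; infer_instance

def pvWitness_join_lists : (List (Int × Int)) × List Int := ([(1, 1), (2, 0), (3, -2)], [10, 20])

def Spec_join_lists (list1 : List (Int × Int)) (list2 : List Int) (out : List (Int × (Int × Int))) : Prop := out = join_lists_alt list1 list2
instance (list1 : List (Int × Int)) (list2 : List Int) (out : List (Int × (Int × Int))) : Decidable (Spec_join_lists list1 list2 out) := by unfold Spec_join_lists; infer_instance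

-- ===== CLAIM (what is proved, stated in full; the proofs are below) =====
def Claim_equal_join_lists : Prop := ∀ (list1 : List (Int × Int)) (list2 : List Int), Dom_join_lists list1 list2 → Pre_join_lists list1 list2 → Spec_join_lists list1 list2 (join_lists list1 list2)

-- ===== LEMMAS AND PROOFS =====

-- reference result: pairs starting at offset s
def pvGen (list2 : List Int) : List (Int × Int) → Int → List (Int × (Int × Int))
  | [], _ => []
  | it :: t, s => ((PySem.List.pyGet? list2 s).getD 0, it) :: pvGen list2 t (s + it.2)

theorem pvA_fold (list2 : List Int) (l1 : List (Int × Int)) :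
    ∀ (acc : List (Int × (Int × Int))) (s : Int),
      (l1.foldl
        (fun (st : List (Int × (Int × Int)) × Int) item =>
          (((PySem.List.pyGet? list2 st.2).getD 0, item) :: st.1, st.2 + item.2))
        (acc, s)).1.reverse = acc.reverse ++ pvGen list2 l1 s := by
  induction l1 with
  | nil => intro acc s; simp [pvGen]
  | cons it t ih =>
      intro acc s
      simp only [List.foldl_cons, pvGen]
      rw [ih]
      simp

theorem pvGen_append (list2 : List Int) (l r : List (Int × Int)) :
    ∀ (s : Int),
      pvGen list2 (l ++ r) s = pvGen list2 l s ++ pvGen list2 r (s + (l.map Prod.snd).sum) := by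
  induction l with
  | nil => intro s; simp [pvGen]
  | cons it t ih =>
      intro s
      simp only [List.cons_append, pvGen, ih, List.map_cons, List.sum_cons]
      rw [show s + it.2 + (t.map Prod.snd).sum = s + (it.2 + (t.map Prod.snd).sum) by ring]

theorem pvGo_eq_gen (list2 : List Int) (items : List (Int × Int)) (base : Int) :
    join_lists_altGo list2 items base = pvGen list2 items base := by
  fun_induction join_lists_altGo list2 items base with
  | case1 => simp [pvGen]
  | case2 => simp [pvGen]
  | case3 a b t base mid left ih1 ih2 =>
      rw [ih1, ih2, ← pvGen_append]
      simp [left]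

-- ===== VERDICT (by name: the statement is the Claim_ definition above) =====
theorem join_lists_spec : Claim_equal_join_lists := by
  intro list1 list2 _ _
  unfold Spec_join_lists join_lists join_lists_alt
  rw [pvA_fold list2 list1 [] 0, pvGo_eq_gen]
  simp
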